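-- pv_equiv track=rewrite | github.com/NikitaDem01/CIAOD | lab4.py | term_stack
-- ===== SOURCE A (Python) =====
-- class Stack:
--     def __init__(self):
--         self.list = []
--
--     def addb(self, x):
--         self.list.insert(0, x)
--
--     def get(self):
--         return self.list
--
--     def out(self):
--         o = self.list[0]
--         self.list = self.list[1:]
--         return o
--
-- def brackets(message):
--     open = 0
--     close = 0
--     s = Stack()
--     l = len(message)
--     while len(message) != 0:
--         s.addb(message[0])
--         message = message[1:]
--     for i in range(l):
--         o = s.out()
--         if o == '(':
--             open += 1
--         if o == ')':
--             close += 1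
--     if open == close:
--         return True
--     else:
--         return False
--
-- def reverse_stack(s):
--     new = Stack()
--     while len(s.get()) > 0:
--         new.addb(s.out())
--     return new
--
-- def term_stack(message):
--     if len(message) == 2 or len(message) == 0:
--         return False
--     if len(message) == 1:
--         if message == 'x' or message == 'y' or message == 'z':
--             return True
--         else:
--             return False
--     if brackets(message) == False:
--         return False
--     s = Stack()
--     for i in message:
--         s.addb(i)
--     s = reverse_stack(s)
--     last = s.out()
--     if last != 'x' and last != 'y' and last != 'z' and last != '(':
--         return False
--     while len(s.get()) > 0:
--         current = s.out()
--         if len(s.get()) == 0 and current != 'x' and current != 'y' and current != 'z':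
--             return False
--         if last == 'x' or last == 'y' or last == 'z' or last == ')':
--             if current != '+' and current != '-' and current != ')':
--                 return False
--         elif last == '+' or last == '-' or last == '(':
--             if current != 'x' and current != 'y' and current != 'z' and current != '(':
--                 return False
--         last = current
--     return True
-- ===== SOURCE B (Python) =====
-- # Table-driven DFA: states 0=expect-operand, 1=after-variable (accepting), 2=closing;
-- # one linear pass plus a balanced-count check.
-- _DELTA = {
--     (0, '('): 0, (0, 'x'): 1, (0, 'y'): 1, (0, 'z'): 1,
--     (1, ')'): 2, (1, '+'): 0, (1, '-'): 0,
--     (2, ')'): 2, (2, '+'): 0, (2, '-'): 0,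
-- }
--
-- def term_stack(message):
--     if message.count('(') != message.count(')'):
--         return False
--     state = 0
--     for c in message:
--         state = _DELTA.get((state, c), -1)
--         if state < 0:
--             return False
--     return state == 1
-- ===== Notes on version B (the rewrite author's own statement) =====
-- stated objective: faster
-- what changed: A rebuilds the string into a linked stack with linear-cost insert(0)/slicing per character, reverses it, counts brackets via a second stack pass, and validates with per-pair adjacency rules plus first/last/length special cases; B runs a table-driven DFA (a 10-entry transition dict over states expect-operand / after-variable / closing, accepting only after-variable) in one linear pass plus a single str.count balance check, with no adjacency rules and no length special cases.
import Mathlib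
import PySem

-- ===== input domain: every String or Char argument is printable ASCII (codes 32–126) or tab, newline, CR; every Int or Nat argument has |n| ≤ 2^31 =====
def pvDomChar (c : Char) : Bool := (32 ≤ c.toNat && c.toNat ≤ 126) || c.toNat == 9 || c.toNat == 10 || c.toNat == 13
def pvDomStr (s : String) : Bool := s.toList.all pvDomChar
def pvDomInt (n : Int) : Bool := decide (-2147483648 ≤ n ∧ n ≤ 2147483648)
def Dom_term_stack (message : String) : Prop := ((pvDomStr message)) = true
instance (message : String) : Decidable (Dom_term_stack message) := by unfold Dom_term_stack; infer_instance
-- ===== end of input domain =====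

-- B replaces A's quadratic stack shuffling, per-pair adjacency rules and length
-- special cases by a table-driven DFA in one linear pass plus a count balance
-- check; objective: faster (asymptotic).

-- ===== PORT A =====
-- Stack.addb prepends; this loop ports both 'while: s.addb(...); message = message[1:]'
-- push loops of brackets/term_stack and the pop/prepend loop of reverse_stack.
def pvStackPush : List Char → List Char → List Char
  | [], s => s
  | c :: rest, s => pvStackPush rest (c :: s)

-- 'for i in range(l): o = s.out(); …' — fuel = l; the empty-stack case would be
-- Python's IndexError but is unreachable since the stack holds exactly l chars.
def pvBracketsCount : Nat → List Char → Int → Int → Int × Int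
  | 0, _, opn, cls => (opn, cls)
  | _+1, [], opn, cls => (opn, cls)
  | n+1, o :: rest, opn, cls =>
      pvBracketsCount n rest (if o = '(' then opn + 1 else opn) (if o = ')' then cls + 1 else cls)

def brackets_port (m : List Char) : Bool :=
  let s := pvStackPush m []
  let p := pvBracketsCount m.length s 0 0
  p.1 == p.2

-- the 'while len(s.get()) > 0' loop of term_stack
def pvTermLoop : List Char → Char → Bool
  | [], _ => true
  | current :: rest, last =>
    if rest.length = 0 ∧ current ≠ 'x' ∧ current ≠ 'y' ∧ current ≠ 'z' then false
    else if last = 'x' ∨ last = 'y' ∨ last = 'z' ∨ last = ')' then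
      if current ≠ '+' ∧ current ≠ '-' ∧ current ≠ ')' then false
      else pvTermLoop rest current
    else if last = '+' ∨ last = '-' ∨ last = '(' then
      if current ≠ 'x' ∧ current ≠ 'y' ∧ current ≠ 'z' ∧ current ≠ '(' then false
      else pvTermLoop rest current
    else pvTermLoop rest current

def term_stack (message : String) : Bool :=
  let m := message.toList
  if m.length = 2 ∨ m.length = 0 then false
  else if m.length = 1 then
    -- "message == 'x' or …": the one-char string equality, compared via toList (exact)
    decide (m = ['x'] ∨ m = ['y'] ∨ m = ['z'])
  else if brackets_port m = false then false
  else
    let s := pvStackPush m []          -- for i in message: s.addb(i)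
    let s2 := pvStackPush s []         -- s = reverse_stack(s)
    match s2 with
    | [] => false                      -- unreachable: len(message) ≥ 3
    | last :: rest =>                  -- last = s.out()
      if last ≠ 'x' ∧ last ≠ 'y' ∧ last ≠ 'z' ∧ last ≠ '(' then false
      else pvTermLoop rest last

-- ===== PORT B =====
-- the transition table _DELTA (state, char) -> state; missing key -> -1 via .get
def pvDelta : PySem.Dict (Int × Char) Int := PySem.Dict.mk
  [((0, '('), 0), ((0, 'x'), 1), ((0, 'y'), 1), ((0, 'z'), 1),
   ((1, ')'), 2), ((1, '+'), 0), ((1, '-'), 0),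
   ((2, ')'), 2), ((2, '+'), 0), ((2, '-'), 0)]

-- "for c in message: state = _DELTA.get((state, c), -1); if state < 0: return False"
def altRun (state : Int) : List Char → Bool
  | [] => state == 1
  | c :: r =>
    let s' := PySem.Dict.getD pvDelta (state, c) (-1)
    if s' < 0 then false else altRun s' r

def term_stack_alt (message : String) : Bool :=
  let m := message.toList
  if m.count '(' ≠ m.count ')' then false
  else altRun 0 m

-- ===== PRECONDITION & SPEC =====
def Spec_term_stack (message : String) (out : Bool) : Prop := out = term_stack_alt message
instance (message : String) (out : Bool) : Decidable (Spec_term_stack message out) := by unfold Spec_term_stack; infer_instance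

-- ===== CLAIM (what is proved, stated in full; the proofs are below) =====
def Claim_equal_term_stack : Prop := ∀ (message : String), Dom_term_stack message → Spec_term_stack message (term_stack message)

-- ===== LEMMAS AND PROOFS =====

theorem pvStackPush_eq (m s : List Char) : pvStackPush m s = m.reverse ++ s := by
  induction m generalizing s with
  | nil => simp [pvStackPush]
  | cons c rest ih => simp [pvStackPush, ih]

theorem pvBracketsCount_eq (s : List Char) (opn cls : Int) :
    pvBracketsCount s.length s opn cls =
      (opn + (s.count '(' : Int), cls + (s.count ')' : Int)) := by
  induction s generalizing opn cls with
  | nil => simp [pvBracketsCount]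
  | cons o rest ih =>
      simp only [List.length_cons, pvBracketsCount, ih, List.count_cons, Prod.mk.injEq,
        beq_iff_eq]
      constructor <;> split_ifs with h <;> simp_all <;> push_cast <;> ring

theorem brackets_port_eq (m : List Char) :
    brackets_port m = (m.count '(' == m.count ')') := by
  have h : (pvStackPush m []).length = m.length := by simp [pvStackPush_eq]
  simp only [brackets_port, ← h, pvBracketsCount_eq, pvStackPush_eq, List.append_nil,
    List.count_reverse, zero_add]
  by_cases he : m.count '(' = m.count ')' <;> simp [he] <;> omega

-- the previous-character adjacency scan (proof intermediate between the two ports)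
def pvIsVar (c : Char) : Bool := c = 'x' || c = 'y' || c = 'z'

def pvAltLoop : List Char → Char → Bool
  | [], _ => true
  | c :: rest, prev =>
    if pvIsVar prev || prev = ')' then
      if !(c = '+' || c = '-' || c = ')') then false else pvAltLoop rest c
    else
      if !(pvIsVar c || c = '(') then false else pvAltLoop rest c

-- the character reached last by the scan
def pvLastc : List Char → Char → Char
  | [], p => p
  | c :: r, _ => pvLastc r c

-- every character the scan can hold in 'last'
def pvAllowed (c : Char) : Prop :=
  c = 'x' ∨ c = 'y' ∨ c = 'z' ∨ c = '+' ∨ c = '-' ∨ c = '(' ∨ c = ')'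

theorem pvLoop_eq (rest : List Char) (last : Char) (hA : pvAllowed last) (hne : rest ≠ []) :
    pvTermLoop rest last = (pvAltLoop rest last && pvIsVar (pvLastc rest last)) := by
  induction rest generalizing last with
  | nil => exact absurd rfl hne
  | cons current rest' ih =>
      by_cases h1 : last = 'x' ∨ last = 'y' ∨ last = 'z' ∨ last = ')'
      · have hb : (pvIsVar last || (last == ')')) = true := by
          rcases h1 with h|h|h|h <;> simp [pvIsVar, h]
        by_cases hcur : current = '+' ∨ current = '-' ∨ current = ')'
        · have hc2 : ¬ (current ≠ '+' ∧ current ≠ '-' ∧ current ≠ ')') := by tauto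
          have hc2b : (!(decide (current = '+') || decide (current = '-') ||
              decide (current = ')'))) = false := by
            rcases hcur with h|h|h <;> simp [h]
          cases rest' with
          | nil =>
              have hnv : ¬ pvIsVar current := by
                rcases hcur with h|h|h <;> subst h <;> decide
              rcases hcur with h|h|h <;> subst h <;>
                simp_all [pvTermLoop, pvAltLoop, pvLastc, pvIsVar]
          | cons c2 r2 =>
              have hAc : pvAllowed current := by
                rcases hcur with h|h|h <;> simp [pvAllowed, h]
              have := ih current hAc (by simp)
              simp_all [pvTermLoop, pvAltLoop, pvLastc, if_pos h1, Bool.and_assoc]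
        · have hc2 : (current ≠ '+' ∧ current ≠ '-' ∧ current ≠ ')') := by tauto
          have hc2b : (!(decide (current = '+') || decide (current = '-') ||
              decide (current = ')'))) = true := by
            push_neg at hcur; simp [hcur]
          cases rest' with
          | nil => simp_all [pvTermLoop, pvAltLoop, pvLastc, if_pos h1, Bool.and_assoc]
          | cons c2 r2 => simp_all [pvTermLoop, pvAltLoop, pvLastc, if_pos h1, Bool.and_assoc]
      · have h1' : last = '+' ∨ last = '-' ∨ last = '(' := by
          rcases hA with h|h|h|h|h|h|h <;> tauto
        have hb : (pvIsVar last || (last == ')')) = false := by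
          rcases h1' with h|h|h <;> simp [pvIsVar, h]
        by_cases hcur : current = 'x' ∨ current = 'y' ∨ current = 'z' ∨ current = '('
        · have hc2 : ¬ (current ≠ 'x' ∧ current ≠ 'y' ∧ current ≠ 'z' ∧ current ≠ '(') := by
            tauto
          have hc2b : (!(pvIsVar current || decide (current = '('))) = false := by
            rcases hcur with h|h|h|h <;> simp [pvIsVar, h]
          cases rest' with
          | nil =>
              rcases hcur with h|h|h|h <;> subst h <;>
                simp_all [pvTermLoop, pvAltLoop, pvLastc, pvIsVar]
          | cons c2 r2 =>
              have hAc : pvAllowed current := by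
                rcases hcur with h|h|h|h <;> simp [pvAllowed, h]
              have := ih current hAc (by simp)
              simp_all [pvTermLoop, pvAltLoop, pvLastc, Bool.and_assoc, pvIsVar, Bool.or_assoc]
              rfl
        · have hc2 : (current ≠ 'x' ∧ current ≠ 'y' ∧ current ≠ 'z' ∧ current ≠ '(') := by
            tauto
          have hc2b : (!(pvIsVar current || decide (current = '('))) = true := by
            push_neg at hcur; simp [pvIsVar, hcur]
          cases rest' with
          | nil => simp_all [pvTermLoop, pvAltLoop, pvLastc, Bool.and_assoc, pvIsVar, Bool.or_assoc]
          | cons c2 r2 => simp_all [pvTermLoop, pvAltLoop, pvLastc, Bool.and_assoc, pvIsVar, Bool.or_assoc]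

-- closed forms of one DFA step: the ten live table entries and the dead lookups
theorem pvStep_dead0 (c : Char) (h1 : c ≠ '(') (h2 : c ≠ 'x') (h3 : c ≠ 'y') (h4 : c ≠ 'z') :
    PySem.Dict.getD pvDelta (0, c) (-1) = -1 := by
  simp [pvDelta, PySem.Dict.getD_eq_get?_getD, PySem.Dict.get?_mk_cons, PySem.Dict.get?,
    Ne.symm h1, Ne.symm h2, Ne.symm h3, Ne.symm h4]

theorem pvStep_dead12 (st : Int) (hs : st = 1 ∨ st = 2) (c : Char)
    (h1 : c ≠ ')') (h2 : c ≠ '+') (h3 : c ≠ '-') :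
    PySem.Dict.getD pvDelta (st, c) (-1) = -1 := by
  rcases hs with h | h <;> subst h <;>
    simp [pvDelta, PySem.Dict.getD_eq_get?_getD, PySem.Dict.get?_mk_cons, PySem.Dict.get?,
      Ne.symm h1, Ne.symm h2, Ne.symm h3]

-- the three live DFA states, characterised against the adjacency scan
theorem pvScan_eq (l : List Char) :
    ((∀ p, p = '+' ∨ p = '-' ∨ p = '(' →
        (pvAltLoop l p && pvIsVar (pvLastc l p)) = altRun 0 l)
      ∧ (∀ v, pvIsVar v = true →
        (pvAltLoop l v && pvIsVar (pvLastc l v)) = altRun 1 l)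
      ∧ (pvAltLoop l ')' && pvIsVar (pvLastc l ')')) = altRun 2 l) := by
  induction l with
  | nil =>
      refine ⟨?_, ?_, ?_⟩
      · intro p hp; rcases hp with h|h|h <;> subst h <;> decide
      · intro v hv; simp [pvAltLoop, pvLastc, hv, altRun]
      · decide
  | cons c r ih =>
      obtain ⟨ih0, ih1, ih2⟩ := ih
      refine ⟨?_, ?_, ?_⟩
      · -- state 0: expecting '('* then a variable
        intro p hp
        have hpn : p ≠ 'x' ∧ p ≠ 'y' ∧ p ≠ 'z' ∧ p ≠ ')' := by
          rcases hp with h|h|h <;> subst h <;> exact ⟨by decide, by decide, by decide, by decide⟩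
        obtain ⟨hp1, hp2, hp3, hp4⟩ := hpn
        by_cases hop : c = '('
        · have H := ih0 '(' (by tauto)
          subst hop
          have hstep : PySem.Dict.getD pvDelta (0, '(') (-1) = 0 := by decide
          simpa [pvAltLoop, pvLastc, pvIsVar, hp1, hp2, hp3, hp4, altRun, hstep] using H
        · by_cases hv : pvIsVar c = true
          · have H := ih1 c hv
            have hx : c = 'x' ∨ c = 'y' ∨ c = 'z' := by have h' := hv; simp [pvIsVar] at h'; tauto
            have hstep : PySem.Dict.getD pvDelta (0, c) (-1) = 1 := by
              rcases hx with h|h|h <;> subst h <;> decide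
            rcases hx with h|h|h <;> subst h <;>
              simpa [pvAltLoop, pvLastc, pvIsVar, hp1, hp2, hp3, hp4, altRun, hstep] using H
          · have hx : ¬ (c = 'x' ∨ c = 'y' ∨ c = 'z') := by have h' := hv; simp [pvIsVar] at h'; tauto
            push_neg at hx
            have hstep := pvStep_dead0 c hop hx.1 hx.2.1 hx.2.2
            simp [pvAltLoop, pvIsVar, hp1, hp2, hp3, hp4, hx.1, hx.2.1, hx.2.2, hop,
              altRun, hstep]
      · -- state 1: just after a variable
        intro v hv
        have hx : v = 'x' ∨ v = 'y' ∨ v = 'z' := by have h' := hv; simp [pvIsVar] at h'; tauto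
        by_cases hcl : c = ')'
        · subst hcl
          have hstep : PySem.Dict.getD pvDelta (1, ')') (-1) = 2 := by decide
          rcases hx with h|h|h <;> subst h <;>
            simpa [pvAltLoop, pvLastc, pvIsVar, altRun, hstep] using ih2
        · by_cases hpm : c = '+' ∨ c = '-'
          · have H := ih0 c (by tauto)
            have hstep : PySem.Dict.getD pvDelta (1, c) (-1) = 0 := by
              rcases hpm with h|h <;> subst h <;> decide
            have hc1 : c ≠ ')' := hcl
            rcases hx with h|h|h <;> subst h <;> rcases hpm with h2|h2 <;> subst h2 <;>
              simpa [pvAltLoop, pvLastc, pvIsVar, altRun, hstep] using H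
          · push_neg at hpm
            have hstep := pvStep_dead12 1 (Or.inl rfl) c hcl hpm.1 hpm.2
            rcases hx with h|h|h <;> subst h <;>
              simp [pvAltLoop, pvIsVar, hpm.1, hpm.2, hcl, altRun, hstep]
      · -- state 2: inside a run of ')' after a variable
        by_cases hcl : c = ')'
        · subst hcl
          have hstep : PySem.Dict.getD pvDelta (2, ')') (-1) = 2 := by decide
          simpa [pvAltLoop, pvLastc, pvIsVar, altRun, hstep] using ih2
        · by_cases hpm : c = '+' ∨ c = '-'
          · have H := ih0 c (by tauto)
            have hstep : PySem.Dict.getD pvDelta (2, c) (-1) = 0 := by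
              rcases hpm with h|h <;> subst h <;> decide
            rcases hpm with h2|h2 <;> subst h2 <;>
              simpa [pvAltLoop, pvLastc, pvIsVar, altRun, hstep] using H
          · push_neg at hpm
            have hstep := pvStep_dead12 2 (Or.inr rfl) c hcl hpm.1 hpm.2
            simp [pvAltLoop, pvIsVar, hpm.1, hpm.2, hcl, altRun, hstep]

theorem pvScan_parse (l : List Char) (p : Char) (hp : p = '+' ∨ p = '-' ∨ p = '(') :
    (pvAltLoop l p && pvIsVar (pvLastc l p)) = altRun 0 l :=
  (pvScan_eq l).1 p hp

theorem pvScan_var (l : List Char) (v : Char) (hv : pvIsVar v = true) :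
    (pvAltLoop l v && pvIsVar (pvLastc l v)) = altRun 1 l :=
  (pvScan_eq l).2.1 v hv

-- the DFA dies immediately on a bad leading character
theorem altRun_bad_head (c : Char) (r : List Char)
    (h : ¬ (c = 'x' ∨ c = 'y' ∨ c = 'z' ∨ c = '(')) :
    altRun 0 (c :: r) = false := by
  push_neg at h
  have hstep := pvStep_dead0 c h.2.2.2 h.1 h.2.1 h.2.2.1
  simp [altRun, hstep]

-- B agrees with A's blanket 'False' on two-character strings
theorem pvAlt_len2 (a b : Char) :
    (if ([a, b].count '(' ≠ [a, b].count ')') then false else altRun 0 [a, b]) = false := by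
  by_cases hne : [a, b].count '(' ≠ [a, b].count ')'
  · simp [hne]
  · rw [if_neg hne]
    push_neg at hne
    by_cases ha : a = '('
    · subst ha
      by_cases hb : b = ')'
      · subst hb; decide
      · exfalso
        have : b ≠ '(' := by
          intro hb2; subst hb2; simp [List.count_cons] at hne
        simp [List.count_cons, hb, this] at hne
    · by_cases hav : a = 'x' ∨ a = 'y' ∨ a = 'z'
      · have hax : a ≠ ')' := by rcases hav with h|h|h <;> subst h <;> decide
        by_cases hbc : b = ')'
        · exfalso
          subst hbc
          simp [List.count_cons, ha, hax] at hne
        · have hstepa : PySem.Dict.getD pvDelta (0, a) (-1) = 1 := by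
            rcases hav with h|h|h <;> subst h <;> decide
          by_cases hbo : b = '+' ∨ b = '-'
          · have hstepb : PySem.Dict.getD pvDelta (1, b) (-1) = 0 := by
              rcases hbo with h|h <;> subst h <;> decide
            simp [altRun, hstepa, hstepb]
          · push_neg at hbo
            have hstepb := pvStep_dead12 1 (Or.inl rfl) b hbc hbo.1 hbo.2
            simp [altRun, hstepa, hstepb]
      · push_neg at hav
        exact altRun_bad_head a [b] (by tauto)

-- ===== VERDICT (by name: the statement is the Claim_ definition above) =====
theorem term_stack_spec : Claim_equal_term_stack := by
  intro message _
  unfold Spec_term_stack term_stack term_stack_alt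
  dsimp only
  by_cases h02 : message.toList.length = 2 ∨ message.toList.length = 0
  · rw [if_pos h02]
    rcases h02 with h2 | h0
    · obtain ⟨a, b, hab⟩ : ∃ a b, message.toList = [a, b] := by
        match hm : message.toList with
        | [a, b] => exact ⟨a, b, rfl⟩
        | [] | [_] | _ :: _ :: _ :: _ => rw [hm] at h2 <;> simp at h2
      rw [hab]
      exact (pvAlt_len2 a b).symm
    · rw [List.length_eq_zero_iff.mp h0]
      decide
  · rw [if_neg h02]
    by_cases h1 : message.toList.length = 1
    · rw [if_pos h1]
      obtain ⟨c, hc⟩ : ∃ c, message.toList = [c] := List.length_eq_one_iff.mp h1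
      rw [hc]
      by_cases hv : c = 'x' ∨ c = 'y' ∨ c = 'z'
      · have hcnt : ¬ (([c] : List Char).count '(' ≠ ([c] : List Char).count ')') := by
          rcases hv with h|h|h <;> subst h <;> decide
        rw [if_neg hcnt]
        rcases hv with h|h|h <;> subst h <;> decide
      · push_neg at hv
        have hmem : ¬ ([c] = ['x'] ∨ [c] = ['y'] ∨ [c] = ['z']) := by
          simp [hv.1, hv.2.1, hv.2.2]
        by_cases hcnt : ([c] : List Char).count '(' ≠ ([c] : List Char).count ')'
        · simp only [if_pos hcnt, if_pos hmem]
          simp [hv.1, hv.2.1, hv.2.2]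
        · rw [if_neg hcnt]
          by_cases hco : c = '('
          · exfalso; subst hco; simp [List.count_cons] at hcnt
          · have hstep := pvStep_dead0 c hco hv.1 hv.2.1 hv.2.2
            simp [altRun, hstep, hv.1, hv.2.1, hv.2.2]
    · rw [if_neg h1, brackets_port_eq]
      by_cases hb : message.toList.count '(' = message.toList.count ')'
      · rw [if_neg (by simp [hb] : ¬ ((message.toList.count '(' == message.toList.count ')') = false)),
            if_neg (not_not_intro hb)]
        rw [show pvStackPush (pvStackPush message.toList []) [] = message.toList from by
          simp [pvStackPush_eq]]
        rcases hm : message.toList with _ | ⟨last, rest⟩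
        · exact absurd (Or.inr (by simp [hm])) h02
        · have hrne : rest ≠ [] := by
            intro h; exact h1 (by simp [hm, h])
          dsimp only
          by_cases hfirst : last = 'x' ∨ last = 'y' ∨ last = 'z' ∨ last = '('
          · have hAl : pvAllowed last := by
              rcases hfirst with h|h|h|h <;> simp [pvAllowed, h]
            rw [if_neg (by tauto : ¬ (last ≠ 'x' ∧ last ≠ 'y' ∧ last ≠ 'z' ∧ last ≠ '(')),
                pvLoop_eq rest last hAl hrne]
            by_cases hlo : last = '('
            · subst hlo
              rw [pvScan_parse rest '(' (by tauto)]
              have hstep : PySem.Dict.getD pvDelta (0, '(') (-1) = 0 := by decide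
              simp [altRun, hstep]
            · have hlv : pvIsVar last = true := by
                rcases hfirst with h|h|h|h <;> simp [pvIsVar, h] <;> exact absurd h hlo
              rw [pvScan_var rest last hlv]
              have hx : last = 'x' ∨ last = 'y' ∨ last = 'z' := by
                have h' := hlv; simp [pvIsVar] at h'; tauto
              have hstep : PySem.Dict.getD pvDelta (0, last) (-1) = 1 := by
                rcases hx with h|h|h <;> subst h <;> decide
              simp [altRun, hstep]
          · rw [if_pos (by tauto : (last ≠ 'x' ∧ last ≠ 'y' ∧ last ≠ 'z' ∧ last ≠ '('))]
            exact (altRun_bad_head last rest hfirst).symm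
      · rw [if_pos (by simp [hb] : (message.toList.count '(' == message.toList.count ')') = false),
            if_pos hb]
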